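-- pv_equiv track=rewrite | github.com/jcpina01-gif/decide-core | backend/scripts/model_robustness_sweep.py | _collect_fieldnames
-- ===== SOURCE A (Python) =====
-- from typing import Any, Optional
--
-- def _collect_fieldnames(rows: list[dict[str, Any]]) -> list[str]:
--     keys: set[str] = set()
--     for r in rows:
--         keys.update(r.keys())
--     meta = ["suite", "window", "profile", "top_q", "cap", "benchmark", "ok", "error", "top5"]
--     front = [k for k in meta if k in keys]
--     mk = sorted(k for k in keys if k.startswith("model_"))
--     bk = sorted(k for k in keys if k.startswith("benchmark_"))
--     rk = sorted(k for k in keys if k.startswith("relative_"))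
--     other = sorted(k for k in keys if k not in front and k not in mk and k not in bk and k not in rk)
--     return front + mk + bk + rk + other
-- ===== SOURCE B (Python) =====
-- def _collect_fieldnames(rows):
--     meta = ["suite", "window", "profile", "top_q", "cap", "benchmark", "ok", "error", "top5"]
--     rank = {m: i for i, m in enumerate(meta)}
--     keys = set()
--     for r in rows:
--         keys.update(r.keys())
--
--     def sortkey(k):
--         if k.startswith("model_"):
--             return (9, k)
--         if k.startswith("benchmark_"):
--             return (10, k)
--         if k.startswith("relative_"):
--             return (11, k)
--         if k in rank:
--             return (rank[k], "")
--         return (12, k)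
--
--     return sorted(keys, key=sortkey)
-- ===== Notes on version B (the rewrite author's own statement) =====
-- stated objective: alternative
-- what changed: Replaces A's bucket-and-concatenate construction (five filter passes, four separate sorts, then front+mk+bk+rk+other) by a single global sort of the key set under a composite rank key (group number, tiebreaker), where meta names get their meta-list index as group number and the tiebreaker orders each prefix group alphabetically.
import Mathlib
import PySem

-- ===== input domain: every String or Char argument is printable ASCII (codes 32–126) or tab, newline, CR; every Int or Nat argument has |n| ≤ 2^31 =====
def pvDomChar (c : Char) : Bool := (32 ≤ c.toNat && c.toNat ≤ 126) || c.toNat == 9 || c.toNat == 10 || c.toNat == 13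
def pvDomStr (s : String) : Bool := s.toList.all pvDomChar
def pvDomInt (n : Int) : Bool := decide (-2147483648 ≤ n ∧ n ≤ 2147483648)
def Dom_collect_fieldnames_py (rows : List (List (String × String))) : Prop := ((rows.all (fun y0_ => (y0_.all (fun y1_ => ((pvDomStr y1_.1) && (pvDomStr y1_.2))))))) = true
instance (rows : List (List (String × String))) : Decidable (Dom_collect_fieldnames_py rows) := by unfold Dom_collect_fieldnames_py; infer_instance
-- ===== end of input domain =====

-- B replaces A's bucket-and-concatenate construction (five filter passes, four sorts,
-- then front ++ mk ++ bk ++ rk ++ other) by a SINGLE global sort of the key set under a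
-- composite rank key (group number, tiebreaker); objective: alternative algorithm.

-- ===== PORT A =====
def pvMetaA : List String := ["suite", "window", "profile", "top_q", "cap", "benchmark", "ok", "error", "top5"]

def collect_fieldnames_py (rows : List (List (String × String))) : List String :=
  let keys : PySem.Set String :=
    rows.foldl (fun s r => PySem.Set.update s (PySem.Dict.keys (PySem.Dict.ofList r))) PySem.Set.empty
  let front := pvMetaA.filter (fun k => PySem.Set.contains keys k)
  let mk := PySem.List.sorted (keys.filter (fun k => PySem.Str.startswith k "model_")) (fun x => x) false
  let bk := PySem.List.sorted (keys.filter (fun k => PySem.Str.startswith k "benchmark_")) (fun x => x) false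
  let rk := PySem.List.sorted (keys.filter (fun k => PySem.Str.startswith k "relative_")) (fun x => x) false
  let other := PySem.List.sorted (keys.filter (fun k =>
      !(front.contains k) && !(mk.contains k) && !(bk.contains k) && !(rk.contains k))) (fun x => x) false
  front ++ mk ++ bk ++ rk ++ other

-- ===== PORT B =====
def pvMetaB : List String := ["suite", "window", "profile", "top_q", "cap", "benchmark", "ok", "error", "top5"]

-- rank = {m: i for i, m in enumerate(meta)}
def pvRank : PySem.Dict String Int :=
  (PySem.List.enumerate pvMetaB).foldl (fun d p => PySem.Dict.insert d p.2 p.1) PySem.Dict.empty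

-- def sortkey(k): the composite (group number, tiebreaker) sort key
def pvSortkey (k : String) : Int × String :=
  if PySem.Str.startswith k "model_" then (9, k)
  else if PySem.Str.startswith k "benchmark_" then (10, k)
  else if PySem.Str.startswith k "relative_" then (11, k)
  else match PySem.Dict.get? pvRank k with
    | some i => (i, "")
    | none => (12, k)

def collect_fieldnames_py_alt (rows : List (List (String × String))) : List String :=
  let keys : PySem.Set String :=
    rows.foldl (fun s r => PySem.Set.update s (PySem.Dict.keys (PySem.Dict.ofList r))) PySem.Set.empty
  PySem.List.sorted2 keys (fun k => (pvSortkey k).1) (fun k => (pvSortkey k).2) false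

-- ===== PRECONDITION & SPEC =====
def Spec_collect_fieldnames_py (rows : List (List (String × String))) (out : List String) : Prop := out = collect_fieldnames_py_alt rows
instance (rows : List (List (String × String))) (out : List String) : Decidable (Spec_collect_fieldnames_py rows out) := by unfold Spec_collect_fieldnames_py; infer_instance

-- ===== CLAIM (what is proved, stated in full; the proofs are below) =====
def Claim_equal_collect_fieldnames_py : Prop := ∀ (rows : List (List (String × String))), Dom_collect_fieldnames_py rows → Spec_collect_fieldnames_py rows (collect_fieldnames_py rows)

-- ===== LEMMAS AND PROOFS =====

-- two nonempty prefixes with different first characters cannot both be prefixes of k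
lemma sw_disj (k : String) {c d : Char} {p q : List Char} (hne : c ≠ d)
    (h1 : PySem.Chars.startswith k.toList (c::p) = true)
    (h2 : PySem.Chars.startswith k.toList (d::q) = true) : False := by
  rw [PySem.Chars.startswith_iff] at h1 h2
  obtain ⟨t1, e1⟩ := h1
  obtain ⟨t2, e2⟩ := h2
  have := e2.trans e1.symm
  simp at this
  exact hne this.1.symm

lemma sw_b_not_m (k : String) (h : PySem.Str.startswith k "benchmark_" = true) :
    PySem.Str.startswith k "model_" = false := by
  by_contra h'
  simp only [Bool.not_eq_false] at h'
  rw [PySem.Str.startswith_eq] at h h'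
  exact sw_disj k (show 'b' ≠ 'm' by decide) (by simpa using h) (by simpa using h')

lemma sw_r_not_m (k : String) (h : PySem.Str.startswith k "relative_" = true) :
    PySem.Str.startswith k "model_" = false := by
  by_contra h'
  simp only [Bool.not_eq_false] at h'
  rw [PySem.Str.startswith_eq] at h h'
  exact sw_disj k (show 'r' ≠ 'm' by decide) (by simpa using h) (by simpa using h')

lemma sw_r_not_b (k : String) (h : PySem.Str.startswith k "relative_" = true) :
    PySem.Str.startswith k "benchmark_" = false := by
  by_contra h'
  simp only [Bool.not_eq_false] at h'
  rw [PySem.Str.startswith_eq] at h h'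
  exact sw_disj k (show 'r' ≠ 'b' by decide) (by simpa using h) (by simpa using h')

-- sortkey values on the four prefix-free classes
lemma key_m (k : String) (h : PySem.Str.startswith k "model_" = true) : pvSortkey k = (9, k) := by
  rw [PySem.Str.startswith_eq] at h
  simp at h
  simp [pvSortkey, h]

lemma key_b (k : String) (h : PySem.Str.startswith k "benchmark_" = true) : pvSortkey k = (10, k) := by
  have hm := sw_b_not_m k h
  rw [PySem.Str.startswith_eq] at h hm
  simp at h hm
  simp [pvSortkey, h, hm]

lemma key_r (k : String) (h : PySem.Str.startswith k "relative_" = true) : pvSortkey k = (11, k) := by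
  have hm := sw_r_not_m k h
  have hb := sw_r_not_b k h
  rw [PySem.Str.startswith_eq] at h hm hb
  simp at h hm hb
  simp [pvSortkey, h, hm, hb]

lemma rank_none (k : String) (h : pvMetaB.contains k = false) : PySem.Dict.get? pvRank k = none := by
  simp [pvMetaB] at h
  obtain ⟨h1, h2, h3, h4, h5, h6, h7, h8, h9⟩ := h
  have e1 : ("suite" == k) = false := beq_eq_false_iff_ne.mpr (Ne.symm h1)
  have e2 : ("window" == k) = false := beq_eq_false_iff_ne.mpr (Ne.symm h2)
  have e3 : ("profile" == k) = false := beq_eq_false_iff_ne.mpr (Ne.symm h3)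
  have e4 : ("top_q" == k) = false := beq_eq_false_iff_ne.mpr (Ne.symm h4)
  have e5 : ("cap" == k) = false := beq_eq_false_iff_ne.mpr (Ne.symm h5)
  have e6 : ("benchmark" == k) = false := beq_eq_false_iff_ne.mpr (Ne.symm h6)
  have e7 : ("ok" == k) = false := beq_eq_false_iff_ne.mpr (Ne.symm h7)
  have e8 : ("error" == k) = false := beq_eq_false_iff_ne.mpr (Ne.symm h8)
  have e9 : ("top5" == k) = false := beq_eq_false_iff_ne.mpr (Ne.symm h9)
  simp [PySem.Dict.get?, show pvRank = ⟨[("suite",(0:Int)),("window",1),("profile",2),("top_q",3),("cap",4),("benchmark",5),("ok",6),("error",7),("top5",8)]⟩ from rfl,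
        List.find?, e1, e2, e3, e4, e5, e6, e7, e8, e9]

lemma key_other (k : String) (hm : PySem.Str.startswith k "model_" = false)
    (hb : PySem.Str.startswith k "benchmark_" = false)
    (hr : PySem.Str.startswith k "relative_" = false)
    (hc : pvMetaB.contains k = false) : pvSortkey k = (12, k) := by
  rw [PySem.Str.startswith_eq] at hm hb hr
  simp at hm hb hr
  simp [pvSortkey, hm, hb, hr, rank_none k hc]

-- meta names get group numbers 0..8, strictly increasing in meta order
lemma key_meta_fst : ∀ k ∈ pvMetaB, (pvSortkey k).1 ≤ 8 := by decide

lemma meta_pairwise : pvMetaB.Pairwise (fun a b => toLex (pvSortkey a) < toLex (pvSortkey b)) := by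
  decide

-- the key set is duplicate-free
lemma nodup_keys (rows : List (List (String × String))) (s : PySem.Set String) (hs : s.Nodup) :
    (rows.foldl (fun s r => PySem.Set.update s (PySem.Dict.keys (PySem.Dict.ofList r))) s).Nodup := by
  induction rows generalizing s with
  | nil => exact hs
  | cons r t ih => exact ih _ (PySem.Set.nodup_update _ _ hs)

-- sorted2 with a composite key is sorted under the lexicographic composite key
lemma sorted2_eq_sorted_toLex {α κ₁ κ₂ : Type} [LinearOrder κ₁] [LinearOrder κ₂]
    (xs : List α) (k1 : α → κ₁) (k2 : α → κ₂) :
    PySem.List.sorted2 xs k1 k2 false = PySem.List.sorted xs (fun x => toLex (k1 x, k2 x)) false := by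
  have hfun : (fun a b => decide (k1 a < k1 b) || (!decide (k1 b < k1 a) && decide (k2 a < k2 b)))
      = (fun a b : α => decide (toLex (k1 a, k2 a) < toLex (k1 b, k2 b))) := by
    funext a b
    rw [Bool.eq_iff_iff]
    simp only [Bool.or_eq_true, Bool.and_eq_true, Bool.not_eq_true', decide_eq_true_eq,
      decide_eq_false_iff_not, Prod.Lex.lt_iff, ofLex_toLex]
    constructor
    · rintro (h | ⟨h1, h2⟩)
      · exact Or.inl h
      · rcases lt_or_eq_of_le (not_lt.mp h1) with h | h
        · exact Or.inl h
        · exact Or.inr ⟨h, h2⟩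
    · rintro (h | ⟨h1, h2⟩)
      · exact Or.inl h
      · exact Or.inr ⟨by rw [h1]; exact lt_irrefl _, h2⟩
  simp only [PySem.List.sorted2, PySem.List.sorted, if_neg (by decide : ¬ (false = true)), hfun]

-- a duplicate-free by-hand sort is strictly increasing
lemma sorted_strict (xs : List String) (h : xs.Nodup) :
    (PySem.List.sorted xs (fun x => x) false).Pairwise (· < ·) := by
  have hle := PySem.List.sorted_pairwise xs (fun x => x)
  have hnd : (PySem.List.sorted xs (fun x => x) false).Nodup :=
    ((PySem.List.sorted_perm xs (fun x => x) false).nodup_iff).mpr h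
  exact (hle.and hnd).imp (fun h => lt_of_le_of_ne h.1 h.2)

-- group numbers order the composite key
lemma lex_of_fst {a b : String} (h : (pvSortkey a).1 < (pvSortkey b).1) :
    toLex (pvSortkey a) < toLex (pvSortkey b) := by
  rw [Prod.Lex.lt_iff]
  exact Or.inl h

-- ===== VERDICT (by name: the statement is the Claim_ definition above) =====
theorem collect_fieldnames_py_spec : Claim_equal_collect_fieldnames_py := by
  intro rows _
  unfold Spec_collect_fieldnames_py
  simp only [collect_fieldnames_py, collect_fieldnames_py_alt]
  set keys := rows.foldl (fun s r => PySem.Set.update s (PySem.Dict.keys (PySem.Dict.ofList r))) PySem.Set.empty with hk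
  have hkeysnd : keys.Nodup := nodup_keys rows _ List.nodup_nil
  rw [sorted2_eq_sorted_toLex]
  set F := pvMetaA.filter (fun k => PySem.Set.contains keys k) with hF
  set MK := PySem.List.sorted (keys.filter (fun k => PySem.Str.startswith k "model_")) (fun x => x) false with hMK
  set BK := PySem.List.sorted (keys.filter (fun k => PySem.Str.startswith k "benchmark_")) (fun x => x) false with hBK
  set RK := PySem.List.sorted (keys.filter (fun k => PySem.Str.startswith k "relative_")) (fun x => x) false with hRK
  set OT := PySem.List.sorted (keys.filter (fun k =>
      !(F.contains k) && !(MK.contains k) && !(BK.contains k) && !(RK.contains k))) (fun x => x) false with hOT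
  -- membership characterisation of the five blocks
  have hmF : ∀ a, a ∈ F ↔ a ∈ pvMetaA ∧ a ∈ keys := by
    intro a; rw [hF]; simp [List.mem_filter]
  have hmMK : ∀ a, a ∈ MK ↔ a ∈ keys ∧ PySem.Str.startswith a "model_" = true := by
    intro a; rw [hMK]; simp [PySem.List.mem_sorted, List.mem_filter]
  have hmBK : ∀ a, a ∈ BK ↔ a ∈ keys ∧ PySem.Str.startswith a "benchmark_" = true := by
    intro a; rw [hBK]; simp [PySem.List.mem_sorted, List.mem_filter]
  have hmRK : ∀ a, a ∈ RK ↔ a ∈ keys ∧ PySem.Str.startswith a "relative_" = true := by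
    intro a; rw [hRK]; simp [PySem.List.mem_sorted, List.mem_filter]
  have hmOT : ∀ a, a ∈ OT ↔ a ∈ keys ∧ a ∉ F ∧ a ∉ MK ∧ a ∉ BK ∧ a ∉ RK := by
    intro a; rw [hOT]
    simp [PySem.List.mem_sorted, List.mem_filter]
    tauto
  -- composite-key values on each block
  have hkF : ∀ a ∈ F, (pvSortkey a).1 ≤ 8 := fun a ha => key_meta_fst a ((hmF a).mp ha).1
  have hkMK : ∀ a ∈ MK, pvSortkey a = (9, a) := fun a ha => key_m a ((hmMK a).mp ha).2
  have hkBK : ∀ a ∈ BK, pvSortkey a = (10, a) := fun a ha => key_b a ((hmBK a).mp ha).2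
  have hkRK : ∀ a ∈ RK, pvSortkey a = (11, a) := fun a ha => key_r a ((hmRK a).mp ha).2
  have hkOT : ∀ a ∈ OT, pvSortkey a = (12, a) := by
    intro a ha
    obtain ⟨haK, hnF, hnM, hnB, hnR⟩ := (hmOT a).mp ha
    refine key_other a ?_ ?_ ?_ ?_
    · by_contra h
      exact hnM ((hmMK a).mpr ⟨haK, by simpa using h⟩)
    · by_contra h
      exact hnB ((hmBK a).mpr ⟨haK, by simpa using h⟩)
    · by_contra h
      exact hnR ((hmRK a).mpr ⟨haK, by simpa using h⟩)
    · by_contra h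
      simp only [Bool.not_eq_false, List.contains_iff_mem] at h
      exact hnF ((hmF a).mpr ⟨h, haK⟩)
  -- the concatenation is strictly increasing under the composite key
  have hR : (F ++ MK ++ BK ++ RK ++ OT).Pairwise
      (fun a b => toLex (pvSortkey a) < toLex (pvSortkey b)) := by
    have pF : F.Pairwise (fun a b => toLex (pvSortkey a) < toLex (pvSortkey b)) :=
      List.Pairwise.sublist List.filter_sublist meta_pairwise
    have pMK : MK.Pairwise (fun a b => toLex (pvSortkey a) < toLex (pvSortkey b)) :=
      (sorted_strict _ (hkeysnd.filter _)).imp_of_mem (fun {a b} ha hb hlt => by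
        rw [Prod.Lex.lt_iff, hkMK a (by rw [hMK]; exact ha), hkMK b (by rw [hMK]; exact hb)]
        exact Or.inr ⟨rfl, hlt⟩)
    have pBK : BK.Pairwise (fun a b => toLex (pvSortkey a) < toLex (pvSortkey b)) :=
      (sorted_strict _ (hkeysnd.filter _)).imp_of_mem (fun {a b} ha hb hlt => by
        rw [Prod.Lex.lt_iff, hkBK a (by rw [hBK]; exact ha), hkBK b (by rw [hBK]; exact hb)]
        exact Or.inr ⟨rfl, hlt⟩)
    have pRK : RK.Pairwise (fun a b => toLex (pvSortkey a) < toLex (pvSortkey b)) :=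
      (sorted_strict _ (hkeysnd.filter _)).imp_of_mem (fun {a b} ha hb hlt => by
        rw [Prod.Lex.lt_iff, hkRK a (by rw [hRK]; exact ha), hkRK b (by rw [hRK]; exact hb)]
        exact Or.inr ⟨rfl, hlt⟩)
    have pOT : OT.Pairwise (fun a b => toLex (pvSortkey a) < toLex (pvSortkey b)) :=
      (sorted_strict _ (hkeysnd.filter _)).imp_of_mem (fun {a b} ha hb hlt => by
        rw [Prod.Lex.lt_iff, hkOT a (by rw [hOT]; exact ha), hkOT b (by rw [hOT]; exact hb)]
        exact Or.inr ⟨rfl, hlt⟩)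
    simp only [List.append_assoc, List.pairwise_append]
    refine ⟨pF, ⟨pMK, ⟨pBK, ⟨pRK, pOT, ?_⟩, ?_⟩, ?_⟩, ?_⟩
    · intro a ha b hb
      exact lex_of_fst (by rw [hkRK a ha, hkOT b hb]; norm_num)
    · intro a ha b hb
      rcases List.mem_append.mp hb with hb | hb
      · exact lex_of_fst (by rw [hkBK a ha, hkRK b hb]; norm_num)
      · exact lex_of_fst (by rw [hkBK a ha, hkOT b hb]; norm_num)
    · intro a ha b hb
      rcases List.mem_append.mp hb with hb | hb
      · exact lex_of_fst (by rw [hkMK a ha, hkBK b hb]; norm_num)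
      · rcases List.mem_append.mp hb with hb | hb
        · exact lex_of_fst (by rw [hkMK a ha, hkRK b hb]; norm_num)
        · exact lex_of_fst (by rw [hkMK a ha, hkOT b hb]; norm_num)
    · intro a ha b hb
      have h8 := hkF a ha
      rcases List.mem_append.mp hb with hb | hb
      · exact lex_of_fst (by rw [hkMK b hb]; omega)
      · rcases List.mem_append.mp hb with hb | hb
        · exact lex_of_fst (by rw [hkBK b hb]; omega)
        · rcases List.mem_append.mp hb with hb | hb
          · exact lex_of_fst (by rw [hkRK b hb]; omega)
          · exact lex_of_fst (by rw [hkOT b hb]; omega)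
  -- it is a permutation of the key set
  have hnd : (F ++ MK ++ BK ++ RK ++ OT).Nodup :=
    hR.imp (fun {a b} hlt => by rintro rfl; exact lt_irrefl _ hlt)
  have hperm : (F ++ MK ++ BK ++ RK ++ OT).Perm keys := by
    rw [List.perm_ext_iff_of_nodup hnd hkeysnd]
    intro a
    simp only [List.mem_append]
    constructor
    · rintro ((((h | h) | h) | h) | h)
      · exact ((hmF a).mp h).2
      · exact ((hmMK a).mp h).1
      · exact ((hmBK a).mp h).1
      · exact ((hmRK a).mp h).1
      · exact ((hmOT a).mp h).1
    · intro haK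
      by_cases hM : a ∈ MK
      · exact Or.inl (Or.inl (Or.inl (Or.inr hM)))
      by_cases hB : a ∈ BK
      · exact Or.inl (Or.inl (Or.inr hB))
      by_cases hRk : a ∈ RK
      · exact Or.inl (Or.inr hRk)
      by_cases hFm : a ∈ F
      · exact Or.inl (Or.inl (Or.inl (Or.inl hFm)))
      exact Or.inr ((hmOT a).mpr ⟨haK, hFm, hM, hB, hRk⟩)
  exact (PySem.List.sorted_eq_of_perm_of_pairwise_lt keys (F ++ MK ++ BK ++ RK ++ OT)
    (fun x => toLex ((pvSortkey x).1, (pvSortkey x).2)) hperm hR).symm
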